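-- pv_equiv track=rewrite | github.com/PDBD071/Desenvolve-python-basico | Modulo 6/aula3_q3mod6.py | find_max_negative_interval
-- ===== SOURCE A (Python) =====
-- def find_max_negative_interval(lst):
--     max_count = 0
--     current_count = 0
--     start_index = 0
--     max_start = max_end = 0
--
--     for i in range(len(lst)):
--         if lst[i] < 0:
--             if current_count == 0:
--                 start_index = i
--             current_count += 1
--         else:
--             if current_count > max_count:
--                 max_count = current_count
--                 max_start = start_index
--                 max_end = i
--             current_count = 0
--
--     if current_count > max_count:
--         max_start = start_index
--         max_end = len(lst)
--
--     return max_start, max_end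
-- ===== SOURCE B (Python) =====
-- def find_max_negative_interval(lst):
--     # Phase 1: materialise all maximal negative runs as (start, length).
--     runs = []
--     cur = None
--     for i, x in enumerate(lst):
--         if x < 0:
--             cur = (i, 1) if cur is None else (cur[0], cur[1] + 1)
--         else:
--             if cur is not None:
--                 runs.append(cur)
--                 cur = None
--     if cur is not None:
--         runs.append(cur)
--     # Phase 2: pick the first longest run (strict >, first wins).
--     best = None
--     for s, c in runs:
--         if best is None or c > best[1]:
--             best = (s, c)
--     if best is None:
--         return (0, 0)
--     return (best[0], best[0] + best[1])
-- ===== Notes on version B (the rewrite author's own statement) =====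
-- stated objective: alternative
-- what changed: Replaces A's fused accumulator loop (running max folded into the scan, with a post-loop fixup for a trailing run) by a two-phase decomposition: one pass materialises all maximal negative runs as (start,length) pairs, then a separate selection pass picks the first longest run.
import Mathlib
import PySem

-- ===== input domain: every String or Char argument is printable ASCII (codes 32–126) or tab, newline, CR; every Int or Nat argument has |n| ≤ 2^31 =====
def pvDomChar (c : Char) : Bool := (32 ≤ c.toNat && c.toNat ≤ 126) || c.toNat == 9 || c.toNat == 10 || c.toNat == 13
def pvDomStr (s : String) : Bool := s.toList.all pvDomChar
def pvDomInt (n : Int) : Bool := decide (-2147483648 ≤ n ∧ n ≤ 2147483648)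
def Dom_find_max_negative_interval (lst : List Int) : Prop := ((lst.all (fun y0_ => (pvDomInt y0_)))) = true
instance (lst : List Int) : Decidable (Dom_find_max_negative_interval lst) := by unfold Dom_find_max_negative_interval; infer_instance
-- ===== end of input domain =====

-- B replaces A's fused accumulator loop by a two-phase decomposition (materialise
-- the maximal negative runs, then select the first longest); same behaviour, same cost.

-- ===== PORT A =====
-- Loop body of A's fused 'for i in range(len(lst))' pass over (index, value) pairs;
-- state = (max_count, current_count, start_index, max_start, max_end).
def aBody (acc : Int × Int × Int × Int × Int) (p : Int × Int) : Int × Int × Int × Int × Int :=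
  match acc, p with
  | (mc, cc, si, ms, me), (i, x) =>
    if x < 0 then
      (mc, cc + 1, (if cc = 0 then i else si), ms, me)
    else
      if cc > mc then (cc, 0, si, si, i) else (mc, 0, si, ms, me)

-- A's post-loop: 'if current_count > max_count: … ; return max_start, max_end'.
def aFinish (n : Int) : Int × Int × Int × Int × Int → Int × Int
  | (mc, cc, si, ms, me) => if cc > mc then (si, n) else (ms, me)

def find_max_negative_interval (lst : List Int) : Int × Int :=
  aFinish (lst.length : Int) ((PySem.List.enumerate lst 0).foldl aBody (0, 0, 0, 0, 0))

-- ===== PORT B =====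
-- Phase 1: all maximal negative runs as (start, length), carrying the open run 'cur'.
def bRuns : List (Int × Int) → Option (Int × Int) → List (Int × Int)
  | [], none => []
  | [], some r => [r]
  | (i, x) :: rest, cur =>
    if x < 0 then
      bRuns rest (some (match cur with | none => (i, 1) | some (s, c) => (s, c + 1)))
    else
      match cur with
      | none => bRuns rest none
      | some r => r :: bRuns rest none

-- Phase 2: first longest run (strict >, first wins).
def bBest : List (Int × Int) → Option (Int × Int) → Option (Int × Int)
  | [], best => best
  | (s, c) :: rest, best =>
    bBest rest (match best with
      | none => some (s, c)
      | some (bs, bc) => if c > bc then some (s, c) else some (bs, bc))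

-- B's final 'return (0,0) / (best[0], best[0]+best[1])'.
def bResult : Option (Int × Int) → Int × Int
  | none => (0, 0)
  | some (s, c) => (s, s + c)

def find_max_negative_interval_alt (lst : List Int) : Int × Int :=
  bResult (bBest (bRuns (PySem.List.enumerate lst 0) none) none)

-- ===== PRECONDITION & SPEC =====
def Spec_find_max_negative_interval (lst : List Int) (out : Int × Int) : Prop := out = find_max_negative_interval_alt lst
instance (lst : List Int) (out : Int × Int) : Decidable (Spec_find_max_negative_interval lst out) := by unfold Spec_find_max_negative_interval; infer_instance

-- ===== CLAIM (what is proved, stated in full; the proofs are below) =====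
def Claim_equal_find_max_negative_interval : Prop := ∀ (lst : List Int), Dom_find_max_negative_interval lst → Spec_find_max_negative_interval lst (find_max_negative_interval lst)

-- ===== LEMMAS AND PROOFS =====

lemma loop_eq (xs : List Int) : ∀ (i mc cc si ms me : Int) (cur bestAcc : Option (Int × Int)),
    ((cc = 0 ∧ cur = none) ∨ (cur = some (si, cc) ∧ 1 ≤ cc ∧ i = si + cc)) →
    ((mc = 0 ∧ ms = 0 ∧ me = 0 ∧ bestAcc = none) ∨ (bestAcc = some (ms, mc) ∧ 1 ≤ mc ∧ me = ms + mc)) →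
    aFinish (i + (xs.length : Int)) ((PySem.List.enumerate xs i).foldl aBody (mc, cc, si, ms, me))
      = bResult (bBest (bRuns (PySem.List.enumerate xs i) cur) bestAcc) := by
  induction xs with
  | nil =>
    intro i mc cc si ms me cur bestAcc hcur hbest
    rcases hcur with ⟨rfl, rfl⟩ | ⟨rfl, hc1, rfl⟩
    · rcases hbest with ⟨rfl, rfl, rfl, rfl⟩ | ⟨rfl, hm1, rfl⟩
      · rfl
      · simp only [PySem.List.enumerate_nil, List.foldl_nil, bRuns, bBest, bResult, aFinish,
          if_neg (show ¬ ((0:Int) > mc) from by omega)]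
    · rcases hbest with ⟨rfl, rfl, rfl, rfl⟩ | ⟨rfl, hm1, rfl⟩
      · simp only [PySem.List.enumerate_nil, List.foldl_nil, List.length_nil, Nat.cast_zero,
          add_zero, bRuns, bBest, bResult, aFinish, if_pos (show cc > (0:Int) from by omega)]
      · simp only [PySem.List.enumerate_nil, List.foldl_nil, List.length_nil, Nat.cast_zero,
          add_zero, bRuns, bBest, bResult, aFinish]
        by_cases h : cc > mc
        · simp only [if_pos h]
        · simp only [if_neg h]
  | cons x xs ih =>
    intro i mc cc si ms me cur bestAcc hcur hbest
    simp only [PySem.List.enumerate_cons, List.foldl_cons, List.length_cons, Nat.cast_add,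
      Nat.cast_one, bRuns]
    rw [show i + ((xs.length : Int) + 1) = (i + 1) + (xs.length : Int) from by ring]
    by_cases hx : x < 0
    · rcases hcur with ⟨rfl, rfl⟩ | ⟨rfl, hc1, rfl⟩
      · simp only [aBody, if_pos hx, zero_add]
        exact ih (i + 1) mc 1 i ms me (some (i, 1)) bestAcc
          (Or.inr ⟨rfl, le_refl 1, by ring⟩) hbest
      · simp only [aBody, if_pos hx, if_neg (show ¬ cc = 0 from by omega)]
        exact ih (si + cc + 1) mc (cc + 1) si ms me (some (si, cc + 1)) bestAcc
          (Or.inr ⟨rfl, by omega, by ring⟩) hbest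
    · rcases hcur with ⟨rfl, rfl⟩ | ⟨rfl, hc1, rfl⟩
      · have hng : ¬ ((0:Int) > mc) := by
          rcases hbest with ⟨rfl, _, _, _⟩ | ⟨_, hm1, _⟩ <;> omega
        simp only [aBody, if_neg hx, if_neg hng]
        exact ih (i + 1) mc 0 si ms me none bestAcc (Or.inl ⟨rfl, rfl⟩) hbest
      · simp only [aBody, if_neg hx, bBest]
        by_cases hgt : cc > mc
        · simp only [if_pos hgt]
          rcases hbest with ⟨rfl, rfl, rfl, rfl⟩ | ⟨rfl, hm1, rfl⟩
          · exact ih (si + cc + 1) cc 0 si si (si + cc) none (some (si, cc))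
              (Or.inl ⟨rfl, rfl⟩) (Or.inr ⟨rfl, by omega, rfl⟩)
          · simp only [if_pos hgt]
            exact ih (si + cc + 1) cc 0 si si (si + cc) none (some (si, cc))
              (Or.inl ⟨rfl, rfl⟩) (Or.inr ⟨rfl, by omega, rfl⟩)
        · simp only [if_neg hgt]
          rcases hbest with ⟨rfl, rfl, rfl, rfl⟩ | ⟨rfl, hm1, rfl⟩
          · exact absurd hgt (by omega)
          · simp only [if_neg hgt]
            exact ih (si + cc + 1) mc 0 si ms (ms + mc) none (some (ms, mc))
              (Or.inl ⟨rfl, rfl⟩) (Or.inr ⟨rfl, hm1, rfl⟩)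

-- ===== VERDICT (by name: the statement is the Claim_ definition above) =====
theorem find_max_negative_interval_spec : Claim_equal_find_max_negative_interval := by
  intro lst _
  unfold Spec_find_max_negative_interval find_max_negative_interval find_max_negative_interval_alt
  have := loop_eq lst 0 0 0 0 0 0 none none (Or.inl ⟨rfl, rfl⟩) (Or.inl ⟨rfl, rfl, rfl, rfl⟩)
  simpa using this
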